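-- pv_equiv track=rewrite | github.com/HuidaeCho/projpicker | projpicker/projpicker.py | tidy_lines
-- ===== SOURCE A (Python) =====
-- def tidy_lines(lines):
--     """
--     Tidy a list of str lines in place by removing leading and trailing
--     whitespaces including newlines. Comments start with a hash and comment-only
--     lines are deleted as if they did not even exist. A line starting with
--     whitespaces immediately followed by a comment is considered a comment-only
--     line and deleted. This function directly modifies the input list to save
--     memory and does not return anything.
--
--     Args:
--         lines (list): List of str lines.
--
--     Returns:
--         list: List of tidied str lines.
--     """
--     for i in reversed(range(len(lines))):
--         if lines[i].startswith("#"):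
--             del lines[i]
--         elif i > 0 and lines[i].strip() == lines[i-1].strip() == "":
--             del lines[i]
--         else:
--             commented = False
--             if "#" in lines[i]:
--                 lines[i] = lines[i].split("#")[0]
--                 commented = True
--             lines[i] = lines[i].strip()
--             if commented and lines[i] == "":
--                 del lines[i]
--     if len(lines) > 0 and lines[0] == "":
--         del lines[0]
--     return lines
-- ===== SOURCE B (Python) =====
-- def tidy_lines(lines):
--     """Forward single-pass rewrite: collapse each run of blank lines to one
--     '', strip comments/whitespace from the rest; mutates lines in place via
--     lines[:] = result (same in-place effect as the original)."""
--     result = []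
--     i, n = 0, len(lines)
--     while i < n:
--         if lines[i].strip() == "":
--             result.append("")
--             while i < n and lines[i].strip() == "":
--                 i += 1
--         else:
--             t = lines[i].split("#")[0].strip()
--             if t:
--                 result.append(t)
--             i += 1
--     if result and result[0] == "":
--         del result[0]
--     lines[:] = result
--     return lines
-- ===== Notes on version B (the rewrite author's own statement) =====
-- stated objective: simpler
-- what changed: Replaces A's backward index loop with in-place del/set mutations by a single forward scan that collapses each blank run to one '' and strips comments from non-blank lines while building a fresh result list (assigned back via lines[:]).
import Mathlib
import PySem

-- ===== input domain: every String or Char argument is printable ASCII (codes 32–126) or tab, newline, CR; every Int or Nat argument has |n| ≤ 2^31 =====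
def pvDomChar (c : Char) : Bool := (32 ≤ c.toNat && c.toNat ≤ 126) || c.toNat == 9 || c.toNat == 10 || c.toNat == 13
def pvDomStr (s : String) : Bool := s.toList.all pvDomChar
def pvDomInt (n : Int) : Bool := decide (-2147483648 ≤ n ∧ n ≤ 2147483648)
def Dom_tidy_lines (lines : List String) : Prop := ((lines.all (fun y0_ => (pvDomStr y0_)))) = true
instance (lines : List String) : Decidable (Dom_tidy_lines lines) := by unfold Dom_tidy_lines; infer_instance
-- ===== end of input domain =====

-- B rewrites A's backward index loop (in-place del/set) as one forward scan that collapses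
-- each blank run to a single "" and strips comments from the other lines; A mutates its
-- argument in place and B re-creates that with lines[:] = result — the theorems here are
-- about the returned value.

-- ===== PORT A =====
-- shared transliteration of the Python subexpression  line.split("#")[0]  (both sources contain it verbatim)
def pvField (x : String) : String := ((PySem.Str.split? x "#").getD []).headD ""

-- one iteration of A's  for i in reversed(range(len(lines)))  body (s = current list, i = index)
def pvStepA (s : List String) (i : Nat) : List String :=
  match s[i]? with
  | none => s   -- unreachable (loop indices stay in range); totality guard only
  | some li =>
    if PySem.Str.startswith li "#" then
      s.eraseIdx i
    else if decide (0 < i) && (PySem.Str.strip li == "") && (PySem.Str.strip (s.getD (i - 1) "") == "") then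
      s.eraseIdx i
    else
      let sc := if PySem.Str.isIn "#" li then (s.set i (pvField li), true) else (s, false)
      let s2 := sc.1.set i (PySem.Str.strip (sc.1.getD i ""))
      if sc.2 && (s2.getD i "" == "") then s2.eraseIdx i else s2

def tidy_lines (lines : List String) : List String :=
  let r := ((List.range lines.length).reverse).foldl pvStepA lines
  if decide (0 < r.length) && (r.getD 0 "" == "") then r.eraseIdx 0 else r

-- ===== PORT B =====
-- the condition  line.strip() == ""  of Source B
def pvBlank (x : String) : Bool := PySem.Str.strip x == ""

-- Source B's outer while loop: one "" per blank run (inner while = dropWhile), comment-strip otherwise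
def pvLoopB : List String → List String
  | [] => []
  | x :: xs =>
    if pvBlank x then
      "" :: pvLoopB (xs.dropWhile pvBlank)
    else
      (let t := PySem.Str.strip (pvField x)
       if t == "" then [] else [t]) ++ pvLoopB xs
termination_by l => l.length
decreasing_by
  · have := List.length_dropWhile_le pvBlank xs
    simp only [List.length_cons]; omega
  · simp only [List.length_cons]; omega

def tidy_lines_alt (lines : List String) : List String :=
  let result := pvLoopB lines
  if decide (result ≠ []) && (result.headD "" == "") then result.eraseIdx 0 else result

-- ===== PRECONDITION & SPEC =====
def Spec_tidy_lines (lines : List String) (out : List String) : Prop := out = tidy_lines_alt lines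
instance (lines : List String) (out : List String) : Decidable (Spec_tidy_lines lines out) := by unfold Spec_tidy_lines; infer_instance

-- ===== CLAIM (what is proved, stated in full; the proofs are below) =====
def Claim_equal_tidy_lines : Prop := ∀ (lines : List String), Dom_tidy_lines lines → Spec_tidy_lines lines (tidy_lines lines)

-- ===== LEMMAS AND PROOFS =====

-- common form of both programs' output before the final leading-"" removal:
-- pvG pb l processes l left to right, pb = "is the raw predecessor line blank"
def pvG : Bool → List String → List String
  | _, [] => []
  | pb, c :: rest =>
    (if PySem.Str.startswith c "#" then []
     else if pb && pvBlank c then []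
     else if PySem.Str.isIn "#" c then
       (let t := PySem.Str.strip (pvField c)
        if t == "" then [] else [t])
     else [PySem.Str.strip c]) ++ pvG (pvBlank c) rest

-- ---- string facts ----

theorem pvBlank_isspace {x : String} (h : pvBlank x = true) :
    ∀ c ∈ x.toList, PySem.Chars.isspace c = true := by
  have hs : PySem.Str.strip x = "" := by simpa [pvBlank] using h
  have h0 : PySem.Chars.strip x.toList = [] := by
    have := congrArg String.toList hs
    simpa [PySem.Str.strip, String.toList_ofList] using this
  have hd : x.toList.dropWhile PySem.Chars.isspace = [] := by
    by_contra hne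
    have hhead := List.head_dropWhile_not PySem.Chars.isspace hne
    have hmem : (x.toList.dropWhile PySem.Chars.isspace).head hne ∈
        x.toList.dropWhile PySem.Chars.isspace := List.head_mem hne
    have hall : ∀ c ∈ (x.toList.dropWhile PySem.Chars.isspace).reverse,
        PySem.Chars.isspace c = true := by
      have hnil : (x.toList.dropWhile PySem.Chars.isspace).reverse.dropWhile PySem.Chars.isspace = [] := by
        have := h0
        simp only [PySem.Chars.strip, PySem.Chars.rstrip, PySem.Chars.lstrip] at this
        simpa [List.reverse_eq_nil_iff] using this
      exact List.dropWhile_eq_nil_iff.mp hnil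
    have := hall _ (List.mem_reverse.mpr hmem)
    rw [this] at hhead; exact Bool.false_ne_true hhead.symm
  exact List.dropWhile_eq_nil_iff.mp hd

theorem pvBlank_not_mem_hash {x : String} (h : pvBlank x = true) : '#' ∉ x.toList := by
  intro hm
  have := pvBlank_isspace h _ hm
  simp [PySem.Chars.isspace] at this

theorem pvBlank_startswith {x : String} (h : pvBlank x = true) :
    PySem.Chars.startswith x.toList ['#'] = false := by
  by_contra hne
  have hs : ('#' :: ([] : List Char)) <+: x.toList := by
    have : PySem.Chars.startswith x.toList ['#'] = true := by
      cases hsw : PySem.Chars.startswith x.toList ['#'] <;> simp_all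
    simpa [PySem.Chars.startswith, List.isPrefixOf_iff_prefix] using this
  exact pvBlank_not_mem_hash h ((List.singleton_infix_iff '#' x.toList).mp hs.isInfix)

theorem pvBlank_isIn {x : String} (h : pvBlank x = true) :
    PySem.Chars.isIn ['#'] x.toList = false := by
  rw [PySem.Chars.isIn_eq_false_iff]
  intro hinf
  exact pvBlank_not_mem_hash h ((List.singleton_infix_iff '#' x.toList).mp hinf)

-- first field of splitOn: the go-accumulator lemmas
theorem pvGo_headD_acc (sep : List Char) (fuel : Nat) :
    ∀ (l cur : List Char) (acc : List (List Char)) (a : List Char),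
      (PySem.Chars.splitOn.go sep fuel l cur (acc ++ [a])).headD [] = a := by
  induction fuel with
  | zero => intro l cur acc a; simp [PySem.Chars.splitOn.go]
  | succ n ih =>
    intro l cur acc a
    cases l with
    | nil => simp [PySem.Chars.splitOn.go]
    | cons c rest =>
      simp only [PySem.Chars.splitOn.go]
      split
      · exact ih _ _ (cur.reverse :: acc) a
      · exact ih _ _ acc a

theorem pvGo_headD (fuel : Nat) :
    ∀ (l cur : List Char), l.length ≤ fuel →
      (PySem.Chars.splitOn.go ['#'] fuel l cur []).headD []
        = cur.reverse ++ l.takeWhile (fun c => !(c == '#')) := by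
  induction fuel with
  | zero =>
    intro l cur hl
    have hnil : l = [] := List.length_eq_zero_iff.mp (Nat.le_zero.mp hl)
    subst hnil; simp [PySem.Chars.splitOn.go]
  | succ n ih =>
    intro l cur hl
    cases l with
    | nil => simp [PySem.Chars.splitOn.go]
    | cons c rest =>
      simp only [PySem.Chars.splitOn.go]
      split
      · rename_i hpre
        simp [List.isPrefixOf] at hpre
        subst hpre
        have hacc := pvGo_headD_acc ['#'] n rest [] [] cur.reverse
        simp only [List.length_cons, List.length_nil, List.drop_succ_cons, List.drop_zero]
        simpa [List.takeWhile_cons] using hacc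
      · rename_i hpre
        have hc : ¬ (c = '#') := by
          intro hcc; subst hcc; simp [List.isPrefixOf] at hpre
        have hrec := ih rest (c :: cur) (by simpa using Nat.le_of_succ_le_succ hl)
        rw [hrec]
        simp [hc]

theorem pvSplitOn_headD (cs : List Char) :
    (PySem.Chars.splitOn cs ['#']).headD [] = cs.takeWhile (fun c => !(c == '#')) := by
  have := pvGo_headD (cs.length + 1) cs [] (Nat.le_succ _)
  simpa [PySem.Chars.splitOn] using this

theorem pvField_eq (x : String) :
    pvField x = String.ofList (x.toList.takeWhile (fun c => !(c == '#'))) := by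
  have hsep : "#".toList = ['#'] := by decide
  have hsplit : PySem.Chars.split? x.toList ['#'] = some (PySem.Chars.splitOn x.toList ['#']) := by
    simp [PySem.Chars.split?]
  unfold pvField
  rw [PySem.Str.split?, hsep, hsplit]
  simp only [Option.map_some, Option.getD_some]
  cases hL : PySem.Chars.splitOn x.toList ['#'] with
  | nil => rw [← pvSplitOn_headD x.toList, hL]; rfl
  | cons h t => rw [← pvSplitOn_headD x.toList, hL]; simp

theorem pvField_of_startswith {x : String} (h : PySem.Chars.startswith x.toList ['#'] = true) :
    pvField x = "" := by
  have hp : ('#' :: ([] : List Char)) <+: x.toList := by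
    simpa [PySem.Chars.startswith, List.isPrefixOf_iff_prefix] using h
  obtain ⟨t, ht⟩ := hp
  rw [pvField_eq, ← ht]
  simp

theorem pvField_of_not_isIn {x : String} (h : PySem.Chars.isIn ['#'] x.toList = false) :
    pvField x = x := by
  have hnm : '#' ∉ x.toList := by
    intro hm
    have : PySem.Chars.isIn ['#'] x.toList = true := by
      rw [PySem.Chars.isIn_iff_infix]
      exact (List.singleton_infix_iff '#' x.toList).mpr hm
    simp [this] at h
  rw [pvField_eq]
  have htw : x.toList.takeWhile (fun c => !(c == '#')) = x.toList := by
    rw [List.takeWhile_eq_self_iff]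
    intro c hc
    simp only [Bool.not_eq_eq_eq_not, Bool.not_true, beq_eq_false_iff_ne, ne_eq]
    intro hcc; subst hcc; exact hnm hc
  rw [htw, String.ofList_toList]

-- ---- B side: pvLoopB = pvG ----

theorem pvG_skip (r : List String) :
    ∀ bs : List String, (∀ b ∈ bs, pvBlank b = true) → pvG true (bs ++ r) = pvG true r := by
  intro bs
  induction bs with
  | nil => intro _; rfl
  | cons b bs ih =>
    intro h
    have hb : pvBlank b = true := h b (by simp)
    have hrest := ih (fun x hx => h x (by simp [hx]))
    simp [pvG, pvBlank_startswith hb, hb, hrest]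

theorem pvLoopB_eq_pvG :
    ∀ (n : Nat) (l : List String) (pb : Bool), l.length ≤ n →
      (∀ x, l.head? = some x → pvBlank x = true → pb = false) →
      pvLoopB l = pvG pb l := by
  intro n
  induction n with
  | zero =>
    intro l pb hl _
    have hnil : l = [] := List.length_eq_zero_iff.mp (Nat.le_zero.mp hl)
    subst hnil; simp [pvLoopB, pvG]
  | succ n ih =>
    intro l pb hl hcond
    cases l with
    | nil => simp [pvLoopB, pvG]
    | cons x xs =>
      by_cases hb : pvBlank x = true
      · have hpb : pb = false := hcond x rfl hb
        subst hpb
        have h1 := pvBlank_startswith hb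
        have h2 := pvBlank_isIn hb
        have hstrip : PySem.Str.strip x = "" := by simpa [pvBlank] using hb
        have hdropeq : pvLoopB (xs.dropWhile pvBlank) = pvG true (xs.dropWhile pvBlank) := by
          apply ih _ true
          · have := List.length_dropWhile_le pvBlank xs
            simp only [List.length_cons] at hl; omega
          · intro y hy hby
            have hne : xs.dropWhile pvBlank ≠ [] := by
              intro hnil; rw [hnil] at hy; simp at hy
            have hhf := List.head_dropWhile_not pvBlank hne
            have hhead : (xs.dropWhile pvBlank).head hne = y := by
              have := List.head?_eq_some_head hne
              rw [this] at hy; exact Option.some.inj hy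
            rw [hhead] at hhf; rw [hhf] at hby; exact absurd hby (by simp)
        have hskip : pvG true xs = pvG true (xs.dropWhile pvBlank) := by
          conv_lhs => rw [← List.takeWhile_append_dropWhile (p := pvBlank) (l := xs)]
          exact pvG_skip _ _ (fun b hbm => List.mem_takeWhile_imp hbm)
        rw [show pvLoopB (x :: xs) = "" :: pvLoopB (xs.dropWhile pvBlank) by
              simp only [pvLoopB]; rw [if_pos hb]]
        rw [hdropeq, ← hskip]
        simp [pvG, h1, h2, hstrip, hb]
      · have hbf : pvBlank x = false := by simpa using hb
        have hxs : pvLoopB xs = pvG false xs := by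
          apply ih xs false
          · simp only [List.length_cons] at hl; omega
          · intro _ _ _; rfl
        rw [show pvLoopB (x :: xs)
              = ((if PySem.Str.strip (pvField x) == "" then [] else [PySem.Str.strip (pvField x)]) ++ pvLoopB xs) by
            simp only [pvLoopB]; rw [if_neg (by simp [hbf])]]
        rw [hxs]
        by_cases hsw : PySem.Chars.startswith x.toList ['#'] = true
        · have hf : pvField x = "" := pvField_of_startswith hsw
          simp [pvG, hsw, hf, hbf, PySem.Str.strip, PySem.Chars.strip,
            PySem.Chars.lstrip, PySem.Chars.rstrip]
        · by_cases hin : PySem.Chars.isIn ['#'] x.toList = true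
          · simp [pvG, hsw, hin, hbf]
          · have hf : pvField x = x := pvField_of_not_isIn (by simpa using hin)
            have hne : ¬ (PySem.Str.strip x = "") := by
              intro hs; rw [show pvBlank x = true by simp [pvBlank, hs]] at hbf; exact absurd hbf (by simp)
            simp [pvG, hsw, hin, hbf, hf, hne]

-- ---- A side: the loop invariant ----

-- the list held by A's loop just before iteration i = j-1, expressed from the original input
def pvInv (lines : List String) (j : Nat) : List String :=
  lines.take j ++ pvG (decide (0 < j) && pvBlank (lines.getD (j - 1) "")) (lines.drop j)

set_option maxHeartbeats 1600000 in
theorem pvStepA_eq (P : List String) (c : String) (T : List String) :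
    pvStepA (P ++ c :: T) P.length =
      P ++ ((if PySem.Str.startswith c "#" then []
        else if (decide (0 < P.length) && pvBlank ((P ++ c :: T).getD (P.length - 1) "")) && pvBlank c then []
        else if PySem.Str.isIn "#" c then
          (let t := PySem.Str.strip (pvField c)
           if t == "" then [] else [t])
        else [PySem.Str.strip c]) ++ T) := by
  have hgetPm : ∀ v : String, (P ++ v :: T)[P.length]? = some v := by
    intro v; rw [List.getElem?_append_right (Nat.le_refl _)]; simp
  have herasev : ∀ v : String, (P ++ v :: T).eraseIdx P.length = P ++ T := by
    intro v; rw [List.eraseIdx_append_of_length_le (Nat.le_refl _)]; simp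
  have hsetv : ∀ v w : String, (P ++ v :: T).set P.length w = P ++ w :: T := by
    intro v w; rw [List.set_append_right _ _ (Nat.le_refl _)]; simp
  by_cases h1 : 0 < P.length <;>
    by_cases h2 : PySem.Str.strip c = "" <;>
      by_cases h3 : PySem.Str.strip ((P ++ c :: T)[P.length - 1]?.getD "") = "" <;>
        by_cases hsw : PySem.Chars.startswith c.toList ['#'] = true <;>
          by_cases hin : PySem.Chars.isIn ['#'] c.toList = true <;>
            by_cases hts : PySem.Str.strip (pvField c) = "" <;>
              simp [pvStepA, pvBlank, herasev, hsetv, h1, h2, h3, hsw, hin, hts]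

theorem pvStepA_inv (lines : List String) (j : Nat) (hj : j < lines.length) :
    pvStepA (pvInv lines (j + 1)) j = pvInv lines j := by
  have hlen : (lines.take j).length = j := by
    simp [List.length_take]; omega
  have htake : lines.take (j + 1) = lines.take j ++ [lines[j]] :=
    List.take_succ_eq_append_getElem hj
  have hdrop : lines.drop j = lines[j] :: lines.drop (j + 1) := by
    rw [List.drop_eq_getElem_cons hj]
  have hgetj : lines[j]?.getD "" = lines[j] := by
    rw [List.getElem?_eq_getElem hj]; rfl
  have hform : pvInv lines (j + 1) = lines.take j ++ lines[j] ::
      pvG (pvBlank (lines.getD j "")) (lines.drop (j + 1)) := by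
    unfold pvInv
    rw [htake, List.append_assoc]
    rfl
  rw [hform]
  have hstep := pvStepA_eq (lines.take j) (lines[j])
      (pvG (pvBlank (lines.getD j "")) (lines.drop (j + 1)))
  rw [hlen] at hstep
  rw [hstep]
  unfold pvInv
  rw [hdrop]
  by_cases h1 : 0 < j
  · have hprev : ∀ L : List String, (lines.take j ++ L)[j - 1]? = lines[j - 1]? := by
      intro L
      rw [List.getElem?_append_left (by rw [hlen]; omega)]
      exact List.getElem?_take_of_lt (by omega)
    by_cases h2 : PySem.Str.strip lines[j] = "" <;>
      by_cases h3 : PySem.Str.strip (lines[j - 1]?.getD "") = "" <;>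
        simp [pvG, pvBlank, hprev, hgetj, h1, h2, h3]
  · have hz : j = 0 := by omega
    subst hz
    simp [pvG, pvBlank, hgetj]

theorem pvFold (lines : List String) :
    ∀ j, j ≤ lines.length →
      ((List.range j).reverse).foldl pvStepA (pvInv lines j) = pvInv lines 0 := by
  intro j
  induction j with
  | zero => intro _; simp
  | succ j ih =>
    intro hj
    rw [List.range_succ, List.reverse_append]
    simp only [List.reverse_singleton, List.singleton_append, List.foldl_cons]
    rw [pvStepA_inv lines j (by omega)]
    exact ih (by omega)

theorem pvA_eq_pvG (lines : List String) :
    ((List.range lines.length).reverse).foldl pvStepA lines = pvG false lines := by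
  have hn : pvInv lines lines.length = lines := by
    unfold pvInv
    simp [pvG]
  have h0 : pvInv lines 0 = pvG false lines := by
    unfold pvInv
    simp
  have hfold := pvFold lines lines.length (Nat.le_refl _)
  rw [hn] at hfold
  rw [hfold, h0]

-- ===== VERDICT (by name: the statement is the Claim_ definition above) =====
theorem tidy_lines_spec : Claim_equal_tidy_lines := by
  unfold Claim_equal_tidy_lines
  intro lines _
  unfold Spec_tidy_lines tidy_lines tidy_lines_alt
  rw [pvA_eq_pvG]
  rw [pvLoopB_eq_pvG lines.length lines false (Nat.le_refl _) (fun _ _ _ => rfl)]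
  cases pvG false lines with
  | nil => simp
  | cons h t => simp [List.getD]
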